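-- pv_equiv track=rewrite | github.com/auranet-js/primaauto | tmp/gads_refresh_rsa_intent.py | parse_ag
-- ===== SOURCE A (Python) =====
-- BRANDS = [
--     "Xiaomi", "BYD", "AITO", "Aito", "Geely", "XPeng", "Zeekr", "Chery", "Hongqi",
--     "Avatr", "Changan", "Li Auto", "NIO", "GAC", "Denza", "Leapmotor", "Jetour",
--     "Deepal", "Luxeed", "Voyah", "Haval", "Tank", "WEY", "IM Motors", "Nevo",
--     "Exlantix", "iCAR", "Galaxy", "Nissan", "Volvo", "Mazda", "MG", "GWM",
-- ]
--
-- def parse_ag(name: str) -> tuple["str | None", "str | None"]: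
--     """
--     Parse ad group name → (brand, model).
--     Examples:
--         "Xiaomi SU7"            → ("Xiaomi", "SU7")
--         "Zeekr"                 → ("Zeekr", None)
--         "Denza D9 DM"           → ("Denza", "D9 DM")
--         "GAC Trumpchi M8"       → ("GAC", "Trumpchi M8")
--         "Import aut z Chin"     → (None, None)   # topic, skip
--         "Chińskie EV i PHEV"    → (None, None)   # topic, skip
--     """
--     name = name.strip()
--     # Sort brands by length desc so "GAC Trumpchi" etc match before "GAC"
--     for brand in sorted(BRANDS, key=len, reverse=True):
--         if name.lower() == brand.lower():
--             return brand, None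
--         if name.lower().startswith(brand.lower() + " "):
--             return brand, name[len(brand) + 1:].strip()
--     return None, None
-- ===== SOURCE B (Python) =====
-- BRANDS = [
--     "Xiaomi", "BYD", "AITO", "Aito", "Geely", "XPeng", "Zeekr", "Chery", "Hongqi",
--     "Avatr", "Changan", "Li Auto", "NIO", "GAC", "Denza", "Leapmotor", "Jetour",
--     "Deepal", "Luxeed", "Voyah", "Haval", "Tank", "WEY", "IM Motors", "Nevo",
--     "Exlantix", "iCAR", "Galaxy", "Nissan", "Volvo", "Mazda", "MG", "GWM",
-- ]
--
--
-- def parse_ag(name: str) -> tuple["str | None", "str | None"]: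
--     # Single pass over BRANDS in original order, keeping the longest match seen
--     # so far (strict '>' so the first-listed brand wins a length tie) -- no sort.
--     name = name.strip()
--     low = name.lower()
--     best = None  # (brand, model)
--     for brand in BRANDS:
--         bl = brand.lower()
--         if low == bl:
--             hit = (brand, None)
--         elif low.startswith(bl + " "):
--             hit = (brand, name[len(brand) + 1:].strip())
--         else:
--             continue
--         if best is None or len(best[0]) < len(brand):
--             best = hit
--     return best if best is not None else (None, None)
-- ===== Notes on version B (the rewrite author's own statement) =====
-- stated objective: alternative
-- what changed: Drops the per-call sort: instead of sorting BRANDS by length descending and returning the first match, B makes one pass over BRANDS in original order keeping the longest matching brand (strict '>' so the first-listed brand wins a length tie, reproducing the stable sort's tie-break), and lowercases the name once instead of per brand.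
import Mathlib
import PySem

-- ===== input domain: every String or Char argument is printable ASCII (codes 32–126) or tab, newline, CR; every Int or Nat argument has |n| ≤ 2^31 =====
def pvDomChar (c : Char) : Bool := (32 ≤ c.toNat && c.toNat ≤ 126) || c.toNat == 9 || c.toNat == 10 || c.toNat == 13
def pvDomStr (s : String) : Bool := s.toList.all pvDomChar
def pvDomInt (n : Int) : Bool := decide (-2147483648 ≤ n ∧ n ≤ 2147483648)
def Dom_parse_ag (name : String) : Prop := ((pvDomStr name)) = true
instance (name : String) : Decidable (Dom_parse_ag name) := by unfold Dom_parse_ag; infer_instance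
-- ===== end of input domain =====

-- B replaces A's sort-then-first-match by a single pass over BRANDS keeping the longest match (alternative decomposition, same cost).

def BRANDS : List String := [
    "Xiaomi", "BYD", "AITO", "Aito", "Geely", "XPeng", "Zeekr", "Chery", "Hongqi",
    "Avatr", "Changan", "Li Auto", "NIO", "GAC", "Denza", "Leapmotor", "Jetour",
    "Deepal", "Luxeed", "Voyah", "Haval", "Tank", "WEY", "IM Motors", "Nevo",
    "Exlantix", "iCAR", "Galaxy", "Nissan", "Volvo", "Mazda", "MG", "GWM"]

-- ===== PORT A =====
-- the for-loop of A: return at the first matching brand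
def parse_ag_loop (name : String) : List String → Option String × Option String
  | [] => (none, none)
  | brand :: rest =>
    if PySem.Str.lower name = PySem.Str.lower brand then (some brand, none)
    else if PySem.Str.startswith (PySem.Str.lower name) (PySem.Str.lower brand ++ " ") then
      (some brand, some (PySem.Str.strip (PySem.Str.slice name (some (PySem.Str.len brand + 1)) none)))
    else parse_ag_loop name rest

def parse_ag (name : String) : Option String × Option String :=
  let name := PySem.Str.strip name
  parse_ag_loop name (PySem.List.sorted BRANDS (fun b => PySem.Str.len b) true)

-- ===== PORT B =====
-- the body of B's for-loop: try brand, keep it if strictly longer than the current best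
def parse_ag_alt_step (name low : String) (best : Option (String × Option String))
    (brand : String) : Option (String × Option String) :=
  let bl := PySem.Str.lower brand
  let hit? : Option (String × Option String) :=
    if low = bl then some (brand, none)
    else if PySem.Str.startswith low (bl ++ " ") then
      some (brand, some (PySem.Str.strip (PySem.Str.slice name (some (PySem.Str.len brand + 1)) none)))
    else none
  match hit? with
  | none => best
  | some hit =>
    match best with
    | none => some hit
    | some (b0, m0) =>
      if PySem.Str.len b0 < PySem.Str.len brand then some hit else some (b0, m0)

def parse_ag_alt (name : String) : Option String × Option String :=
  let name := PySem.Str.strip name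
  let low := PySem.Str.lower name
  match BRANDS.foldl (parse_ag_alt_step name low) none with
  | none => (none, none)
  | some (b, m) => (some b, m)

-- ===== PRECONDITION & SPEC =====
def Spec_parse_ag (name : String) (out : Option String × Option String) : Prop := out = parse_ag_alt name
instance (name : String) (out : Option String × Option String) : Decidable (Spec_parse_ag name out) := by unfold Spec_parse_ag; infer_instance

-- ===== CLAIM (what is proved, stated in full; the proofs are below) =====
def Claim_equal_parse_ag : Prop := ∀ (name : String), Dom_parse_ag name → Spec_parse_ag name (parse_ag name)

-- ===== LEMMAS AND PROOFS =====

-- outcome of testing one brand against the (stripped) name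
def pvTest (name brand : String) : Option (Option String) :=
  if PySem.Str.lower name = PySem.Str.lower brand then some none
  else if PySem.Str.startswith (PySem.Str.lower name) (PySem.Str.lower brand ++ " ") then
    some (some (PySem.Str.strip (PySem.Str.slice name (some (PySem.Str.len brand + 1)) none)))
  else none

-- first match in a list
def pvFM (name : String) : List String → Option (String × Option String)
  | [] => none
  | b :: r =>
    match pvTest name b with
    | some mo => some (b, mo)
    | none => pvFM name r

-- B's accumulator step, expressed through pvTest
def pvUpd (name : String) (acc : Option (String × Option String)) (b : String) :
    Option (String × Option String) :=
  match pvTest name b with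
  | none => acc
  | some mo =>
    match acc with
    | none => some (b, mo)
    | some (b0, m0) =>
      if PySem.Str.len b0 < PySem.Str.len b then some (b, mo) else some (b0, m0)

theorem pvStep_eq (name : String) :
    parse_ag_alt_step name (PySem.Str.lower name) = pvUpd name := by
  funext best brand
  simp only [parse_ag_alt_step, pvUpd, pvTest]
  by_cases h1 : PySem.Str.lower name = PySem.Str.lower brand
  · rw [if_pos h1, if_pos h1]
  · rw [if_neg h1, if_neg h1]
    by_cases h2 : PySem.Str.startswith (PySem.Str.lower name) (PySem.Str.lower brand ++ " ") = true
    · rw [if_pos h2, if_pos h2]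
    · rw [if_neg h2, if_neg h2]

theorem pvFM_mem (name : String) (l : List String) (b0 : String) (m0 : Option String)
    (h : pvFM name l = some (b0, m0)) : b0 ∈ l := by
  induction l with
  | nil => simp [pvFM] at h
  | cons a r ih =>
    simp only [pvFM] at h
    cases hc : pvTest name a with
    | some mo => rw [hc] at h; simp_all
    | none => rw [hc] at h; exact List.mem_cons_of_mem _ (ih h)

-- the core step: inserting b into a length-descending S commutes with the fold step
theorem pvFM_insertBy (name b : String) (S : List String)
    (hs : S.Pairwise (fun a c => PySem.Str.len c ≤ PySem.Str.len a)) :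
    pvFM name (PySem.List.insertBy (fun a c => decide (PySem.Str.len c < PySem.Str.len a)) b S)
      = pvUpd name (pvFM name S) b := by
  induction S with
  | nil =>
    simp only [PySem.List.insertBy, pvFM, pvUpd]
    cases pvTest name b <;> rfl
  | cons a S ih =>
    have hs' : S.Pairwise (fun a c => PySem.Str.len c ≤ PySem.Str.len a) := hs.tail
    have hbound : ∀ y ∈ S, PySem.Str.len y ≤ PySem.Str.len a := (List.pairwise_cons.mp hs).1
    simp only [PySem.List.insertBy]
    by_cases hlt : PySem.Str.len a < PySem.Str.len b
    · rw [if_pos (by simpa using hlt)]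
      simp only [pvFM, pvUpd]
      cases hb : pvTest name b with
      | none =>
        cases ha : pvTest name a with
        | some mo => rfl
        | none => cases hr : pvFM name S <;> rfl
      | some mo =>
        cases ha : pvTest name a with
        | some mo' =>
          simp
          intro h; exfalso
          have hh : a.length < b.length := by simpa using hlt
          omega
        | none =>
          cases hr : pvFM name S with
          | none => rfl
          | some p =>
            obtain ⟨b0, m0⟩ := p
            have hlt0 : PySem.Str.len b0 < PySem.Str.len b :=
              lt_of_le_of_lt (hbound b0 (pvFM_mem name S b0 m0 hr)) hlt
            simp
            intro h; exfalso
            have hh : b0.length < b.length := by simpa using hlt0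
            omega
    · rw [if_neg (by simpa using hlt)]
      simp only [pvFM]
      cases ha : pvTest name a with
      | some mo =>
        simp only [pvUpd]
        cases hb : pvTest name b with
        | none => rfl
        | some mo' =>
          simp
          intro h; exfalso
          have hh : ¬ a.length < b.length := by simpa using hlt
          omega
      | none => exact ih hs'

theorem pvInsertBy_pairwise (b : String) (S : List String)
    (hs : S.Pairwise (fun a c => PySem.Str.len c ≤ PySem.Str.len a)) :
    (PySem.List.insertBy (fun a c => decide (PySem.Str.len c < PySem.Str.len a)) b S).Pairwise
      (fun a c => PySem.Str.len c ≤ PySem.Str.len a) := by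
  induction S with
  | nil => simp [PySem.List.insertBy]
  | cons a S ih =>
    have hs' := hs.tail
    have hbound : ∀ y ∈ S, PySem.Str.len y ≤ PySem.Str.len a := (List.pairwise_cons.mp hs).1
    simp only [PySem.List.insertBy]
    by_cases hlt : PySem.Str.len a < PySem.Str.len b
    · rw [if_pos (by simpa using hlt)]
      refine List.pairwise_cons.mpr ⟨?_, hs⟩
      intro y hy
      rcases List.mem_cons.mp hy with h | h
      · subst h; exact le_of_lt hlt
      · exact le_trans (hbound y h) (le_of_lt hlt)
    · rw [if_neg (by simpa using hlt)]
      refine List.pairwise_cons.mpr ⟨?_, ih hs'⟩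
      intro y hy
      rcases (PySem.List.mem_insertBy _ _ _ _).mp hy with h | h
      · subst h; exact not_lt.mp hlt
      · exact hbound y h

-- fold-best over L = first match in the (stable, length-descending) insertion sort of L
theorem pvFold_eq_fm (name : String) (L : List String) :
    L.foldl (pvUpd name) none
      = pvFM name (L.foldl
          (fun acc x => PySem.List.insertBy (fun a c => decide (PySem.Str.len c < PySem.Str.len a)) x acc) []) := by
  suffices h :
      (L.foldl (fun acc x => PySem.List.insertBy (fun a c => decide (PySem.Str.len c < PySem.Str.len a)) x acc) []).Pairwise
        (fun a c => PySem.Str.len c ≤ PySem.Str.len a) ∧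
      L.foldl (pvUpd name) none
        = pvFM name (L.foldl
            (fun acc x => PySem.List.insertBy (fun a c => decide (PySem.Str.len c < PySem.Str.len a)) x acc) []) from h.2
  induction L using List.reverseRecOn with
  | nil => exact ⟨List.Pairwise.nil, rfl⟩
  | append_singleton L b ih =>
    rw [List.foldl_append, List.foldl_append]
    simp only [List.foldl_cons, List.foldl_nil]
    exact ⟨pvInsertBy_pairwise b _ ih.1, by rw [pvFM_insertBy name b _ ih.1, ih.2]⟩

-- A's loop = first match, packaged
theorem pvLoop_eq_fm (name : String) (l : List String) :
    parse_ag_loop name l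
      = (match pvFM name l with
         | none => (none, none)
         | some (b, m) => (some b, m)) := by
  induction l with
  | nil => rfl
  | cons a r ih =>
    simp only [parse_ag_loop, pvFM, pvTest]
    by_cases h1 : PySem.Str.lower name = PySem.Str.lower a
    · rw [if_pos h1, if_pos h1]
    · rw [if_neg h1, if_neg h1]
      by_cases h2 : PySem.Str.startswith (PySem.Str.lower name) (PySem.Str.lower a ++ " ") = true
      · rw [if_pos h2, if_pos h2]
      · rw [if_neg h2, if_neg h2]
        exact ih

-- the whole equivalence, for the already-stripped name
theorem pv_main (n : String) :
    parse_ag_loop n (PySem.List.sorted BRANDS (fun b => PySem.Str.len b) true)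
      = (match BRANDS.foldl (parse_ag_alt_step n (PySem.Str.lower n)) none with
         | none => (none, none)
         | some (b, m) => (some b, m)) := by
  rw [pvStep_eq, pvFold_eq_fm, pvLoop_eq_fm, PySem.List.sorted_rev_eq_foldl_insertBy]

-- ===== VERDICT (by name: the statement is the Claim_ definition above) =====
theorem parse_ag_spec : Claim_equal_parse_ag := by
  intro name _
  show parse_ag name = parse_ag_alt name
  unfold parse_ag parse_ag_alt
  exact pv_main (PySem.Str.strip name)
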